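-- pv_equiv track=rewrite | github.com/RicklosNZ/Todesk_Extractor | Todesk_Extractor.py | store_Data
-- ===== SOURCE A (Python) =====
-- def store_Data(msg):
--     result = []
--     temp = ""
--     for char in msg:
--         if char == "#":
--             if not temp.endswith("#"):
--                 temp += char
--             else:
--                 continue
--         else:
--             temp += char
--         if temp.endswith("#"):
--             segment = temp.rstrip("#")
--             if segment:
--                 result.append(segment)
--             temp = ""
--     if temp:
--         result.append(temp)
--
--     return result
-- ===== SOURCE B (Python) =====
-- def store_Data(msg):
--     return [s for s in msg.split('#') if s]
-- ===== Notes on version B (the rewrite author's own statement) =====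
-- stated objective: simpler
-- what changed: Replaces the char-by-char state machine (buffer, endswith/rstrip collapse-and-emit) with one library split on the delimiter followed by filtering out the empty segments.
import Mathlib
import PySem

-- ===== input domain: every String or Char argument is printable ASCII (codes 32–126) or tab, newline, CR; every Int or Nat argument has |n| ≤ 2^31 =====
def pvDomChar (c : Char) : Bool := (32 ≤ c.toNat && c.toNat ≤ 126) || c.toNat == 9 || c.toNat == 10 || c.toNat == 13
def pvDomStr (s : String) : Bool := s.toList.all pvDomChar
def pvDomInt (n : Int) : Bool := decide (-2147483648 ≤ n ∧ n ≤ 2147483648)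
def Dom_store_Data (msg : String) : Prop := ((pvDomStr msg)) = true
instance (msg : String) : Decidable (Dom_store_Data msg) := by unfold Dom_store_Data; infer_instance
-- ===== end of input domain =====

-- B replaces A's buffered char-by-char collapse-and-emit state machine with a library split on '#'
-- plus a filter dropping the empty segments; objective: simpler.

-- ===== PORT A =====
-- A works on Python strings; the port works on List Char (code points) and rebuilds Strings at the
-- end — exact, since Python str concatenation/endswith/rstrip correspond to the Chars operations.
-- temp.rstrip("#") is ported by hand as dropping trailing '#' (exact: rstrip(chars) removes all
-- trailing occurrences of the given chars, here just '#').
def store_Data_step (st : List (List Char) × List Char) (c : Char) :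
    List (List Char) × List Char :=
  -- the two branches of "if char == '#'": on the else-of-endswith branch Python 'continue's,
  -- skipping the common emit check; otherwise temp += char and the emit check runs.
  if c = '#' ∧ PySem.Chars.endswith st.2 ['#'] then st
  else
    let temp := st.2 ++ [c]
    if PySem.Chars.endswith temp ['#'] then
      let segment := (temp.reverse.dropWhile (· = '#')).reverse  -- temp.rstrip("#")
      (if segment ≠ [] then st.1 ++ [segment] else st.1, [])
    else (st.1, temp)

def store_Data (msg : String) : List String :=
  let st := msg.toList.foldl store_Data_step ([], [])
  (if st.2 ≠ [] then st.1 ++ [st.2] else st.1).map (fun cs => String.mk cs)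

-- ===== PORT B =====
-- Source B: return [s for s in msg.split('#') if s] — split is PySem.Chars.splitOn (the sep ≠ "" form
-- of str.split), then the comprehension keeps the non-empty segments.
def store_Data_alt (msg : String) : List String :=
  ((PySem.Chars.splitOn msg.toList ['#']).filter (fun s => s ≠ [])).map (fun cs => String.mk cs)

-- ===== PRECONDITION & SPEC =====
def Spec_store_Data (msg : String) (out : List String) : Prop := out = store_Data_alt msg
instance (msg : String) (out : List String) : Decidable (Spec_store_Data msg out) := by unfold Spec_store_Data; infer_instance

-- ===== CLAIM (what is proved, stated in full; the proofs are below) =====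
def Claim_equal_store_Data : Prop := ∀ (msg : String), Dom_store_Data msg → Spec_store_Data msg (store_Data msg)

-- ===== LEMMAS AND PROOFS =====

-- single-char-separator characterisation of splitOn
def mySplit : List Char → List (List Char)
  | [] => [[]]
  | c :: rest =>
    if c = '#' then [] :: mySplit rest
    else
      match mySplit rest with
      | [] => [[c]]
      | h :: t => (c :: h) :: t

theorem mySplit_ne_nil (l : List Char) : mySplit l ≠ [] := by
  cases l with
  | nil => simp [mySplit]
  | cons c rest =>
    simp only [mySplit]
    split
    · simp
    · cases h : mySplit rest <;> simp

def consHead (p : List Char) : List (List Char) → List (List Char)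
  | [] => [p]
  | h :: t => (p ++ h) :: t

theorem splitOn_go_eq (l : List Char) : ∀ (fuel : Nat) (cur : List Char) (acc : List (List Char)),
    l.length < fuel →
    PySem.Chars.splitOn.go ['#'] fuel l cur acc
      = acc.reverse ++ consHead cur.reverse (mySplit l) := by
  induction l with
  | nil =>
    intro fuel cur acc h
    cases fuel with
    | zero => omega
    | succ f => simp [PySem.Chars.splitOn.go, mySplit, consHead]
  | cons c rest ih =>
    intro fuel cur acc h
    cases fuel with
    | zero => simp at h
    | succ f =>
      by_cases hc : c = '#'
      · subst hc
        have hpre : List.isPrefixOf ['#'] ('#' :: rest) = true := by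
          simp [List.isPrefixOf]
        rw [PySem.Chars.splitOn.go]
        simp only [hpre, if_true, List.length_cons, List.length_nil, Nat.zero_add,
          List.drop_succ_cons, List.drop_zero] at *
        rw [ih f [] (cur.reverse :: acc) (by omega)]
        simp [mySplit, consHead]
        cases hms : mySplit rest with
        | nil => exact absurd hms (mySplit_ne_nil rest)
        | cons hh tt => simp [consHead]
      · have hpre : List.isPrefixOf ['#'] (c :: rest) = false := by
          simp [List.isPrefixOf]; intro hcc; exact absurd hcc.symm hc
        rw [PySem.Chars.splitOn.go]
        simp only [hpre, Bool.false_eq_true, if_false]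
        rw [ih f (c :: cur) acc (by simpa using Nat.lt_of_succ_lt_succ h)]
        simp only [mySplit, hc, if_false, List.reverse_cons]
        cases hms : mySplit rest with
        | nil => exact absurd hms (mySplit_ne_nil rest)
        | cons hh tt => simp [consHead]

theorem splitOn_eq_mySplit (l : List Char) :
    PySem.Chars.splitOn l ['#'] = mySplit l := by
  have := splitOn_go_eq l (l.length + 1) [] [] (by omega)
  simp only [PySem.Chars.splitOn] at *
  rw [this]
  cases hms : mySplit l with
  | nil => exact absurd hms (mySplit_ne_nil l)
  | cons h t => simp [consHead]

-- under the invariant '#' ∉ temp the step function reduces to the simple split-collapse step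
theorem step_hash (result : List (List Char)) (temp : List Char) (hinv : '#' ∉ temp) :
    store_Data_step (result, temp) '#'
      = (if temp ≠ [] then result ++ [temp] else result, []) := by
  have hend : PySem.Chars.endswith temp ['#'] = false := by
    rw [← Bool.not_eq_true, PySem.Chars.endswith_iff]
    intro hsuf
    exact hinv (hsuf.mem (by simp))
  have hend2 : PySem.Chars.endswith (temp ++ ['#']) ['#'] = true := by
    rw [PySem.Chars.endswith_iff]; exact ⟨temp, rfl⟩
  have hdrop : List.dropWhile (fun c => decide (c = '#')) temp.reverse = temp.reverse := by
    cases htr : temp.reverse with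
    | nil => simp
    | cons x xs =>
      have hx : x ≠ '#' := by
        intro hxeq
        apply hinv
        have hxm : x ∈ temp.reverse := by rw [htr]; simp
        rw [List.mem_reverse] at hxm
        rwa [hxeq] at hxm
      simp [List.dropWhile_cons, hx]
  simp only [store_Data_step, hend, Bool.false_eq_true, and_false, if_false, hend2, if_true,
    and_true]
  simp [hend, hdrop]

theorem step_other (result : List (List Char)) (temp : List Char) (c : Char) (hc : c ≠ '#') :
    store_Data_step (result, temp) c = (result, temp ++ [c]) := by
  have hend2 : PySem.Chars.endswith (temp ++ [c]) ['#'] = false := by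
    rw [← Bool.not_eq_true, PySem.Chars.endswith_iff]
    rintro ⟨t, ht⟩
    have h3 : '#' = c := by
      have := congrArg (fun l => l.getLast?) ht
      simpa using this
    exact hc h3.symm
  simp [store_Data_step, hc, hend2]

theorem foldl_step_eq (l : List Char) : ∀ (result : List (List Char)) (temp : List Char),
    '#' ∉ temp →
    (let st := l.foldl store_Data_step (result, temp)
     if st.2 ≠ [] then st.1 ++ [st.2] else st.1)
      = result ++ (consHead temp (mySplit l)).filter (fun s => s ≠ []) := by
  induction l with
  | nil =>
    intro result temp hinv
    simp only [List.foldl_nil, mySplit, consHead, List.append_nil, List.filter]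
    by_cases h : temp = [] <;> simp [h]
  | cons c rest ih =>
    intro result temp hinv
    by_cases hc : c = '#'
    · subst hc
      simp only [List.foldl_cons, step_hash result temp hinv]
      rw [ih _ [] (by simp)]
      simp only [mySplit, if_true]
      cases hms : mySplit rest with
      | nil => exact absurd hms (mySplit_ne_nil rest)
      | cons h t =>
        simp only [consHead, List.nil_append, List.filter]
        by_cases htemp : temp = [] <;> simp [htemp]
    · simp only [List.foldl_cons, step_other result temp c hc]
      rw [ih _ (temp ++ [c]) (by
        intro hmem
        rcases List.mem_append.mp hmem with h | h
        · exact hinv h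
        · simp at h; exact hc h.symm)]
      simp only [mySplit, hc, if_false]
      cases hms : mySplit rest with
      | nil => exact absurd hms (mySplit_ne_nil rest)
      | cons h t => simp [consHead]

-- ===== VERDICT (by name: the statement is the Claim_ definition above) =====
theorem store_Data_spec : Claim_equal_store_Data := by
  intro msg _
  unfold Spec_store_Data store_Data store_Data_alt
  rw [splitOn_eq_mySplit]
  have h2 := foldl_step_eq msg.toList [] [] (by simp)
  simp only [List.nil_append] at h2
  cases hms : mySplit msg.toList with
  | nil => exact absurd hms (mySplit_ne_nil _)
  | cons h t =>
    rw [hms] at h2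
    simp only [consHead, List.nil_append] at h2
    simpa using congrArg (List.map (fun cs => String.mk cs)) h2
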